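-- pv_equiv track=rewrite | github.com/ZaGrayWolf/KLIV_Intern | SegFormer-BO/SFBO.py | calculate_theoretical_flops
-- ===== SOURCE A (Python) =====
-- import math
--
-- def calculate_theoretical_flops(input_size, num_classes=19):
--     """Calculates theoretical FLOPs for SegFormer-B0."""
--     c, h, w = input_size
--     total_flops = 0
--
--     # SegFormer-B0 configuration
--     widths = [32, 64, 160, 256]
--     depths = [2, 2, 2, 2]
--     num_heads = [1, 2, 5, 8]
--     reduction_ratios = [8, 4, 2, 1]
--     patch_sizes = [7, 3, 3, 3]
--     strides = [4, 2, 2, 2]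
--     decoder_channels = 256
--
--     current_h, current_w = h, w
--
--     # Stage-wise computation
--     for stage_idx in range(4):
--         # Patch merging
--         in_ch = c if stage_idx == 0 else widths[stage_idx - 1]
--         out_ch = widths[stage_idx]
--         patch_size = patch_sizes[stage_idx]
--         stride = strides[stage_idx]
--
--         # Update dimensions
--         current_h = math.ceil(current_h / stride)
--         current_w = math.ceil(current_w / stride)
--
--         # Patch merging conv FLOPs
--         total_flops += 2 * in_ch * out_ch * (patch_size ** 2) * current_h * current_w
--
--         # Transformer blocks
--         for _ in range(depths[stage_idx]):
--             seq_len = current_h * current_w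
--             seq_len_kv = seq_len // (reduction_ratios[stage_idx] ** 2) if reduction_ratios[stage_idx] > 1 else seq_len
--
--             # Self-attention FLOPs (simplified)
--             total_flops += 4 * seq_len * out_ch * out_ch  # Q, K, V projections + output
--             total_flops += 2 * num_heads[stage_idx] * seq_len * seq_len_kv * (out_ch // num_heads[stage_idx])
--
--             # MixFFN FLOPs
--             hidden_ch = out_ch * 4
--             total_flops += 2 * seq_len * out_ch * hidden_ch  # FC1
--             total_flops += hidden_ch * 9 * current_h * current_w  # DW Conv
--             total_flops += 2 * seq_len * hidden_ch * out_ch  # FC2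
--
--     # Decoder FLOPs (simplified)
--     for width in widths:
--         total_flops += 2 * width * decoder_channels * (h // 4) * (w // 4)
--
--     # Final head
--     total_flops += 2 * (decoder_channels * len(widths)) * num_classes * (h // 4) * (w // 4)
--
--     # Final upsampling
--     total_flops += 7 * num_classes * h * w
--
--     return total_flops
-- ===== SOURCE B (Python) =====
-- def calculate_theoretical_flops(input_size, num_classes=19):
--     """SegFormer-B0 theoretical FLOPs as a closed-form formula.
--
--     The chained math.ceil(h/stride) updates are collapsed to single ceiling
--     divisions by the cumulative strides 4, 8, 16, 32 (valid since
--     ceil(ceil(n/a)/b) == ceil(n/(a*b)) for positive integer a, b, and the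
--     float divisions by these powers of two are exact for |n| <= 2**31),
--     and all fixed SegFormer-B0 configuration constants are folded into
--     literal coefficients, so no loops or config tables remain."""
--     c, h, w = input_size
--     s1 = (-(-h // 4)) * (-(-w // 4))   # stage-1 tokens
--     s2 = (-(-h // 8)) * (-(-w // 8))   # stage-2 tokens
--     s3 = (-(-h // 16)) * (-(-w // 16)) # stage-3 tokens
--     s4 = (-(-h // 32)) * (-(-w // 32)) # stage-4 tokens
--     q = (h // 4) * (w // 4)            # decoder/head spatial size
--     return (3136 * c * s1 + 43264 * s1 + 128 * s1 * (s1 // 64)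
--             + 205312 * s2 + 256 * s2 * (s2 // 16)
--             + 1219840 * s3 + 640 * s3 * (s3 // 4)
--             + 3377152 * s4 + 1024 * s4 * s4
--             + (262144 + 2048 * num_classes) * q
--             + 7 * num_classes * h * w)
-- ===== Notes on version B (the rewrite author's own statement) =====
-- stated objective: alternative
-- what changed: B replaces A's nested stage/depth loops and config tables by one closed-form polynomial: the chained math.ceil(h/stride) updates are collapsed to single ceiling divisions by the cumulative strides 4/8/16/32 and all fixed SegFormer-B0 constants are folded into literal coefficients.
import Mathlib
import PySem

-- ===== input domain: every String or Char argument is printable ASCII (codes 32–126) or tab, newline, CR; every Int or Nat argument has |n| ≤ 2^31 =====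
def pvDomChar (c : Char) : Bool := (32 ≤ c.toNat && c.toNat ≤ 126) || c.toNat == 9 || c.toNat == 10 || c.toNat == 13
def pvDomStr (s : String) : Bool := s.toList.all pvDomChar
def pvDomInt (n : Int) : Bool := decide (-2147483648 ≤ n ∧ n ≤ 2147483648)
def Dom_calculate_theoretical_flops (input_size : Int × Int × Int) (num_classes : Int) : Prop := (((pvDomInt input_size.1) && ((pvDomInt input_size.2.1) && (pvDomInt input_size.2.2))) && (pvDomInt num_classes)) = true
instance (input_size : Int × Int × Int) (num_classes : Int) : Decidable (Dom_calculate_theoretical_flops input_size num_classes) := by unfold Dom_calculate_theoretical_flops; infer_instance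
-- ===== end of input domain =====

-- B replaces A's stage/depth loops by one closed-form polynomial: the chained ceils are
-- collapsed to ceiling divisions by the cumulative strides and all fixed configuration
-- constants are folded into literal coefficients.

-- math.ceil(a / s) with s a power of two and |a| ≤ 2^31: the float division is exact,
-- so it equals ceiling division -((-a) // s); ported exactly as such.
def pvCeilDiv (a b : Int) : Int := -(PySem.Int.floordiv (-a) b)

-- ===== PORT A =====
def calculate_theoretical_flops (input_size : Int × Int × Int) (num_classes : Int) : Int :=
  let c := input_size.1
  let h := input_size.2.1
  let w := input_size.2.2
  let widths : List Int := [32, 64, 160, 256]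
  let depths : List Nat := [2, 2, 2, 2]
  let num_heads : List Int := [1, 2, 5, 8]
  let reduction_ratios : List Int := [8, 4, 2, 1]
  let patch_sizes : List Int := [7, 3, 3, 3]
  let strides : List Int := [4, 2, 2, 2]
  let decoder_channels : Int := 256
  -- for stage_idx in range(4): state = (current_h, current_w, total_flops)
  let st := ([0, 1, 2, 3] : List Nat).foldl (fun (st : Int × Int × Int) stage_idx =>
    let in_ch := if stage_idx == 0 then c else widths.getD (stage_idx - 1) 0
    let out_ch := widths.getD stage_idx 0
    let patch_size := patch_sizes.getD stage_idx 0
    let stride := strides.getD stage_idx 0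
    let current_h := pvCeilDiv st.1 stride
    let current_w := pvCeilDiv st.2.1 stride
    let total := st.2.2 + 2 * in_ch * out_ch * (patch_size ^ 2) * current_h * current_w
    -- for _ in range(depths[stage_idx]):
    let total := (List.range (depths.getD stage_idx 0)).foldl (fun total _ =>
      let seq_len := current_h * current_w
      let seq_len_kv := if reduction_ratios.getD stage_idx 0 > 1 then
          PySem.Int.floordiv seq_len ((reduction_ratios.getD stage_idx 0) ^ 2)
        else seq_len
      let total := total + 4 * seq_len * out_ch * out_ch
      let total := total + 2 * (num_heads.getD stage_idx 0) * seq_len * seq_len_kv *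
          (PySem.Int.floordiv out_ch (num_heads.getD stage_idx 0))
      let hidden_ch := out_ch * 4
      let total := total + 2 * seq_len * out_ch * hidden_ch
      let total := total + hidden_ch * 9 * current_h * current_w
      total + 2 * seq_len * hidden_ch * out_ch) total
    (current_h, current_w, total)) (h, w, 0)
  let total_flops := st.2.2
  -- decoder
  let total_flops := widths.foldl (fun t width =>
    t + 2 * width * decoder_channels * (PySem.Int.floordiv h 4) * (PySem.Int.floordiv w 4)) total_flops
  -- final head
  let total_flops := total_flops + 2 * (decoder_channels * (widths.length : Int)) * num_classes *
    (PySem.Int.floordiv h 4) * (PySem.Int.floordiv w 4)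
  -- final upsampling
  total_flops + 7 * num_classes * h * w

-- ===== PORT B =====
def calculate_theoretical_flops_alt (input_size : Int × Int × Int) (num_classes : Int) : Int :=
  let c := input_size.1
  let h := input_size.2.1
  let w := input_size.2.2
  let s1 := pvCeilDiv h 4 * pvCeilDiv w 4
  let s2 := pvCeilDiv h 8 * pvCeilDiv w 8
  let s3 := pvCeilDiv h 16 * pvCeilDiv w 16
  let s4 := pvCeilDiv h 32 * pvCeilDiv w 32
  let q := PySem.Int.floordiv h 4 * PySem.Int.floordiv w 4
  3136 * c * s1 + 43264 * s1 + 128 * s1 * (PySem.Int.floordiv s1 64)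
    + 205312 * s2 + 256 * s2 * (PySem.Int.floordiv s2 16)
    + 1219840 * s3 + 640 * s3 * (PySem.Int.floordiv s3 4)
    + 3377152 * s4 + 1024 * s4 * s4
    + (262144 + 2048 * num_classes) * q
    + 7 * num_classes * h * w

-- ===== PRECONDITION & SPEC =====
def Spec_calculate_theoretical_flops (input_size : Int × Int × Int) (num_classes : Int) (out : Int) : Prop := out = calculate_theoretical_flops_alt input_size num_classes
instance (input_size : Int × Int × Int) (num_classes : Int) (out : Int) : Decidable (Spec_calculate_theoretical_flops input_size num_classes out) := by unfold Spec_calculate_theoretical_flops; infer_instance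

-- ===== CLAIM =====
def Claim_equal_calculate_theoretical_flops : Prop := ∀ (input_size : Int × Int × Int) (num_classes : Int), Dom_calculate_theoretical_flops input_size num_classes → Spec_calculate_theoretical_flops input_size num_classes (calculate_theoretical_flops input_size num_classes)

-- ===== LEMMAS AND PROOFS =====
-- ceiling-division composition for the concrete cumulative strides
theorem pvCeilDiv_comp_4_2 (a : Int) : pvCeilDiv (pvCeilDiv a 4) 2 = pvCeilDiv a 8 := by
  simp only [pvCeilDiv, PySem.Int.floordiv_eq_ediv_of_pos (by omega : (0:Int) < 4),
    PySem.Int.floordiv_eq_ediv_of_pos (by omega : (0:Int) < 2),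
    PySem.Int.floordiv_eq_ediv_of_pos (by omega : (0:Int) < 8)]
  omega

theorem pvCeilDiv_comp_8_2 (a : Int) : pvCeilDiv (pvCeilDiv a 8) 2 = pvCeilDiv a 16 := by
  simp only [pvCeilDiv, PySem.Int.floordiv_eq_ediv_of_pos (by omega : (0:Int) < 8),
    PySem.Int.floordiv_eq_ediv_of_pos (by omega : (0:Int) < 2),
    PySem.Int.floordiv_eq_ediv_of_pos (by omega : (0:Int) < 16)]
  omega

theorem pvCeilDiv_comp_16_2 (a : Int) : pvCeilDiv (pvCeilDiv a 16) 2 = pvCeilDiv a 32 := by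
  simp only [pvCeilDiv, PySem.Int.floordiv_eq_ediv_of_pos (by omega : (0:Int) < 16),
    PySem.Int.floordiv_eq_ediv_of_pos (by omega : (0:Int) < 2),
    PySem.Int.floordiv_eq_ediv_of_pos (by omega : (0:Int) < 32)]
  omega

-- ===== VERDICT =====
theorem calculate_theoretical_flops_spec : Claim_equal_calculate_theoretical_flops := by
  intro input_size num_classes _
  unfold Spec_calculate_theoretical_flops calculate_theoretical_flops calculate_theoretical_flops_alt
  simp only [List.foldl, List.getD, List.range, List.range.loop, List.length,
    List.getElem?_cons_zero, List.getElem?_cons_succ, Option.getD,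
    pvCeilDiv_comp_4_2, pvCeilDiv_comp_8_2, pvCeilDiv_comp_16_2]
  norm_num
  ring
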